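-- pv_equiv track=rewrite | github.com/jokumon/TOA_Project | software/cfg_parser.py | derive_string
-- ===== SOURCE A (Python) =====
-- def derive_string(cfg, start_symbol, target_string):
--     steps = []
--
--     def expand(current, depth=0):
--         steps.append(" ".join(current))
--
--         current_str = ''.join(current)
--         if current_str == target_string:
--             return True
--
--         if depth > 2 * len(target_string):
--             steps.pop()
--             return False
--
--         for i, symbol in enumerate(current):
--             if symbol in cfg:
--                 for production in cfg[symbol]:
--                     new_string = current[:i] + production + current[i+1:]
--                     if expand(new_string, depth + 1):
--                         return True
--
--         steps.pop()
--         return False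
--
--     success = expand([start_symbol])
--     return success, steps
-- ===== SOURCE B (Python) =====
-- def derive_string(cfg, start_symbol, target_string):
--     # Iterative DFS with an explicit stack of (remaining-children, depth) frames
--     # instead of recursion; same left-to-right visit order and depth cutoff.
--     limit = 2 * len(target_string)
--
--     def children(cur):
--         return [cur[:i] + p + cur[i + 1:]
--                 for i, s in enumerate(cur) if s in cfg for p in cfg[s]]
--
--     path = [start_symbol]
--     if start_symbol == target_string:
--         return True, path
--     stack = [(children([start_symbol]), 0)]
--     while stack:
--         cs, d = stack[-1]
--         if not cs:
--             stack.pop()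
--             path.pop()
--             continue
--         stack[-1] = (cs[1:], d)
--         c = cs[0]
--         path.append(' '.join(c))
--         if ''.join(c) == target_string:
--             return True, path
--         if d + 1 > limit:
--             path.pop()
--             continue
--         stack.append((children(c), d + 1))
--     return False, []
-- ===== Notes on version B (the rewrite author's own statement) =====
-- stated objective: alternative
-- what changed: The recursive DFS with a mutated global steps list is replaced by an explicit iterative search over a stack of (remaining-children, depth) frames with a separate path list, precomputing each node's children with one comprehension; same visit order, cutoff and first accepting path.
import Mathlib
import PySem

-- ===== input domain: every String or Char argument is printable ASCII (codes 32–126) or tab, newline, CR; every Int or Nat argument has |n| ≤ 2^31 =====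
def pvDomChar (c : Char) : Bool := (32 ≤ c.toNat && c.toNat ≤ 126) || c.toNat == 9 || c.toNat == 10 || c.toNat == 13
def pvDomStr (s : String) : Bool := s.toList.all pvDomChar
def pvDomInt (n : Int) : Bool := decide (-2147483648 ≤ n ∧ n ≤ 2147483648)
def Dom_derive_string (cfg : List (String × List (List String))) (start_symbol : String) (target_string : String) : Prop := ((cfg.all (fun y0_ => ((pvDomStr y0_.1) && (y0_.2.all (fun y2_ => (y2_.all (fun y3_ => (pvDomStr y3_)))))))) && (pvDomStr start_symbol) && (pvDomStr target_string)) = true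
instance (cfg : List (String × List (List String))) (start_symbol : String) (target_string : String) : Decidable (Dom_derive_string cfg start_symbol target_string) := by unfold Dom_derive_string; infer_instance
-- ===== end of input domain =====

-- B replaces A's recursive DFS (mutating a shared `steps` list) by an explicit iterative
-- stack machine over (remaining-children, depth) frames with a separate `path` list;
-- same left-to-right visit order, depth cutoff and result (objective: alternative).

-- ===== PORT A =====
-- A's recursion, with Python's mutated global `steps` threaded as an explicit argument
-- (a failing subtree restores `steps`, so threading the returned list is faithful), and
-- the cutoff `depth > 2*len(target)` carried as the remaining fuel 2*len(target)+1-depth.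

-- the `for production in cfg[symbol]` loop of A's expand (`expand` = the recursive call)
def pvProdsA (expand : List String → List String → Bool × List String)
    (current : List String) (i : Int) : List (List String) → List String → Bool × List String
  | [], s1 => (false, s1)
  | prod :: ps, s1 =>
    -- new_string = current[:i] + production + current[i+1:]
    match expand (PySem.List.slice current none (some i) ++ prod ++ PySem.List.slice current (some (i+1)) none) s1 with
    | (true, st) => (true, st)
    | (false, st) => pvProdsA expand current i ps st

-- the `for i, symbol in enumerate(current)` loop of A's expand
def pvPosA (cfg : List (String × List (List String)))
    (expand : List String → List String → Bool × List String) (current : List String) :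
    List (Int × String) → List String → List String → Bool × List String
  | [], _s1, s0 => (false, s0)              -- loop exhausted: steps.pop() restores s0
  | (i, sym) :: rest, s1, s0 =>
    match (PySem.Dict.mk cfg).get? sym with -- if symbol in cfg: … cfg[symbol] …
    | none => pvPosA cfg expand current rest s1 s0
    | some prods =>
      match pvProdsA expand current i prods s1 with
      | (true, st) => (true, st)
      | (false, st) => pvPosA cfg expand current rest st s0

def pvExpandA (cfg : List (String × List (List String))) (target : String) :
    Nat → List String → List String → Bool × List String
  | fuel, current, steps =>
    let steps1 := steps ++ [PySem.Str.join " " current]    -- steps.append(" ".join(current))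
    if PySem.Str.join "" current == target then (true, steps1)
    else match fuel with
      | 0 => (false, steps)                                -- cutoff: append then pop = input steps
      | Nat.succ f =>
        pvPosA cfg (fun c s => pvExpandA cfg target f c s) current
          (PySem.List.enumerate current 0) steps1 steps

def derive_string (cfg : List (String × List (List String))) (start_symbol : String) (target_string : String) : Bool × List String :=
  -- root call expand([start_symbol], 0) with fuel 2*len(target)+1 (= cutoff 'depth > 2*len(target)')
  pvExpandA cfg target_string (2 * target_string.toList.length + 1) [start_symbol] []

-- ===== PORT B =====
-- children of one position: [cur[:i] + p + cur[i+1:] for p in cfg[s]] if s in cfg else []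
def pvG (cfg : List (String × List (List String))) (cur : List String) (p : Int × String) : List (List String) :=
  match (PySem.Dict.mk cfg).get? p.2 with
  | some prods => prods.map (fun pr =>
      PySem.List.slice cur none (some p.1) ++ pr ++ PySem.List.slice cur (some (p.1+1)) none)
  | none => []

-- Source B's `children(cur)` comprehension
def pvChildrenB (cfg : List (String × List (List String))) (cur : List String) : List (List String) :=
  (PySem.List.enumerate cur 0).flatMap (pvG cfg cur)

-- upper bound on the number of machine steps spent on one node explored with `f` budget
def pvCostB (cfg : List (String × List (List String))) : Nat → List String → Nat
  | 0, _ => 2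
  | Nat.succ f, c => 2 + ((pvChildrenB cfg c).map (pvCostB cfg f)).sum

-- upper bound on the number of remaining iterations of Source B's while loop
def pvPhiB (cfg : List (String × List (List String))) (limit : Nat) :
    List (List (List String) × Nat) → Nat
  | [] => 0
  | (cs, d) :: rest => 1 + ((cs.map (pvCostB cfg (limit - d))).sum) + pvPhiB cfg limit rest

-- Source B's `while stack:` loop; a frame is (remaining children, depth).  The Nat argument is
-- only a totality guard: it strictly exceeds the number of iterations left (proved below),
-- so the fuel-exhausted arm is never reached for the fuel derive_string_alt passes.
def pvLoopB (cfg : List (String × List (List String))) (target : String) (limit : Nat) :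
    Nat → List (List (List String) × Nat) → List String → Bool × List String
  | 0, _, _ => (false, [])
  | Nat.succ _f, [], _path => (false, [])
  | Nat.succ f, ([], _d) :: rest, path => pvLoopB cfg target limit f rest path.dropLast  -- stack.pop(); path.pop()
  | Nat.succ f, (c :: cs, d) :: rest, path =>
    let path1 := path ++ [PySem.Str.join " " c]            -- path.append(' '.join(c))
    if PySem.Str.join "" c == target then (true, path1)
    else if limit < d + 1 then pvLoopB cfg target limit f ((cs, d) :: rest) path  -- cutoff: path.pop()
    else pvLoopB cfg target limit f ((pvChildrenB cfg c, d + 1) :: (cs, d) :: rest) path1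

def derive_string_alt (cfg : List (String × List (List String))) (start_symbol : String) (target_string : String) : Bool × List String :=
  let limit := 2 * target_string.toList.length
  if start_symbol == target_string then (true, [start_symbol])
  else
    let stack0 := [(pvChildrenB cfg [start_symbol], 0)]
    pvLoopB cfg target_string limit (pvPhiB cfg limit stack0 + 1) stack0 [start_symbol]

-- ===== PRECONDITION & SPEC =====
def Spec_derive_string (cfg : List (String × List (List String))) (start_symbol : String) (target_string : String) (out : Bool × List String) : Prop := out = derive_string_alt cfg start_symbol target_string
instance (cfg : List (String × List (List String))) (start_symbol : String) (target_string : String) (out : Bool × List String) : Decidable (Spec_derive_string cfg start_symbol target_string out) := by unfold Spec_derive_string; infer_instance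

-- ===== CLAIM (what is proved, stated in full; the proofs are below) =====
def Claim_equal_derive_string : Prop := ∀ (cfg : List (String × List (List String))) (start_symbol : String) (target_string : String), Dom_derive_string cfg start_symbol target_string → Spec_derive_string cfg start_symbol target_string (derive_string cfg start_symbol target_string)

-- ===== LEMMAS AND PROOFS =====

-- unfold lemmas for the fuelled recursion
lemma pvExpandA_zero (cfg : List (String × List (List String))) (target : String)
    (c s : List String) :
    pvExpandA cfg target 0 c s =
      if PySem.Str.join "" c == target then (true, s ++ [PySem.Str.join " " c]) else (false, s) := by
  rw [pvExpandA]

lemma pvExpandA_succ (cfg : List (String × List (List String))) (target : String)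
    (f : Nat) (c s : List String) :
    pvExpandA cfg target (f + 1) c s =
      if PySem.Str.join "" c == target then (true, s ++ [PySem.Str.join " " c])
      else pvPosA cfg (fun c' s' => pvExpandA cfg target f c' s') c
        (PySem.List.enumerate c 0) (s ++ [PySem.Str.join " " c]) s := by
  rw [pvExpandA]

-- run a search function over a list of sibling nodes, all from the same entry `steps` list
def pvRunO (e : List String → List String → Bool × List String) :
    List (List String) → List String → Option (List String)
  | [], _ => none
  | c :: cs, s =>
    match e c s with
    | (true, st) => some st
    | (false, _) => pvRunO e cs s

lemma pvRunO_append (e : List String → List String → Bool × List String)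
    (xs ys : List (List String)) (s : List String) :
    pvRunO e (xs ++ ys) s =
      (match pvRunO e xs s with
       | some st => some st
       | none => pvRunO e ys s) := by
  induction xs with
  | nil => simp [pvRunO]
  | cons c cs ih =>
    rw [List.cons_append, pvRunO, pvRunO]
    rcases e c s with ⟨b, st⟩
    cases b with
    | true => rfl
    | false => exact ih

-- a failing inner loop restores the steps list it received
lemma pvProdsA_false (e : List String → List String → Bool × List String)
    (he : ∀ c s, (e c s).1 = false → e c s = (false, s))
    (current : List String) (i : Int) :
    ∀ (ps : List (List String)) (s1 : List String),
      (pvProdsA e current i ps s1).1 = false → pvProdsA e current i ps s1 = (false, s1) := by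
  intro ps
  induction ps with
  | nil => intro s1 _; rw [pvProdsA]
  | cons prod tl ih =>
    intro s1 h
    rw [pvProdsA] at h ⊢
    rcases hE : e (PySem.List.slice current none (some i) ++ prod ++ PySem.List.slice current (some (i+1)) none) s1 with ⟨b, st⟩
    rw [hE] at h
    cases b with
    | true => simp at h
    | false =>
      have hst : st = s1 := by
        have h2 := he _ s1 (by rw [hE])
        rw [hE] at h2
        exact ((Prod.mk.injEq _ _ _ _).mp h2).2
      subst hst
      exact ih _ h

-- a failing position loop restores the pre-append steps list s0
lemma pvPosA_false (cfg : List (String × List (List String)))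
    (e : List String → List String → Bool × List String)
    (he : ∀ c s, (e c s).1 = false → e c s = (false, s)) (current : List String) :
    ∀ (P : List (Int × String)) (s1 s0 : List String),
      (pvPosA cfg e current P s1 s0).1 = false → pvPosA cfg e current P s1 s0 = (false, s0) := by
  intro P
  induction P with
  | nil => intro s1 s0 _; rw [pvPosA]
  | cons p rest ih =>
    obtain ⟨i, sym⟩ := p
    intro s1 s0 h
    rw [pvPosA] at h ⊢
    cases hlook : (PySem.Dict.mk cfg).get? sym with
    | none =>
      rw [hlook] at h
      exact ih s1 s0 h
    | some prods =>
      rw [hlook] at h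
      replace h : (match pvProdsA e current i prods s1 with
                   | (true, st) => (true, st)
                   | (false, st) => pvPosA cfg e current rest st s0).1 = false := h
      show (match pvProdsA e current i prods s1 with
            | (true, st) => (true, st)
            | (false, st) => pvPosA cfg e current rest st s0) = (false, s0)
      rcases hP : pvProdsA e current i prods s1 with ⟨b, st⟩
      rw [hP] at h
      cases b with
      | true => simp at h
      | false =>
        have hst : st = s1 := by
          have h2 := pvProdsA_false e he current i prods s1 (by rw [hP])
          rw [hP] at h2
          exact ((Prod.mk.injEq _ _ _ _).mp h2).2
        subst hst
        exact ih _ s0 h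

-- a failing expand restores the steps list it received
lemma pvExpandA_false (cfg : List (String × List (List String))) (target : String) :
    ∀ (f : Nat) (c s : List String),
      (pvExpandA cfg target f c s).1 = false → pvExpandA cfg target f c s = (false, s) := by
  intro f
  induction f with
  | zero =>
    intro c s h
    rw [pvExpandA_zero] at h ⊢
    by_cases ht : PySem.Str.join "" c == target
    · rw [if_pos ht] at h; simp at h
    · rw [if_neg ht]
  | succ f ih =>
    intro c s h
    rw [pvExpandA_succ] at h ⊢
    by_cases ht : PySem.Str.join "" c == target
    · rw [if_pos ht] at h; simp at h
    · rw [if_neg ht] at h ⊢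
      exact pvPosA_false cfg _ ih c _ _ _ h

-- the inner production loop equals one run over this position's children
lemma pvProdsA_eq (e : List String → List String → Bool × List String)
    (he : ∀ c s, (e c s).1 = false → e c s = (false, s)) (current : List String) (i : Int) :
    ∀ (ps : List (List String)) (s1 : List String),
      pvProdsA e current i ps s1 =
        (match pvRunO e (ps.map (fun pr => PySem.List.slice current none (some i) ++ pr ++ PySem.List.slice current (some (i+1)) none)) s1 with
         | some st => (true, st)
         | none => (false, s1)) := by
  intro ps
  induction ps with
  | nil => intro s1; rw [pvProdsA]; rfl
  | cons prod tl ih =>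
    intro s1
    rw [pvProdsA]
    simp only [List.map_cons, pvRunO]
    rcases hE : e (PySem.List.slice current none (some i) ++ prod ++ PySem.List.slice current (some (i+1)) none) s1 with ⟨b, st⟩
    cases b with
    | true => rfl
    | false =>
      have hst : st = s1 := by
        have h2 := he _ s1 (by rw [hE])
        rw [hE] at h2
        exact ((Prod.mk.injEq _ _ _ _).mp h2).2
      subst hst
      exact ih _

-- A's two nested loops equal one run over the flattened children list
lemma pvPosA_eq (cfg : List (String × List (List String)))
    (e : List String → List String → Bool × List String)
    (he : ∀ c s, (e c s).1 = false → e c s = (false, s)) (current : List String) :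
    ∀ (P : List (Int × String)) (s1 s0 : List String),
      pvPosA cfg e current P s1 s0 =
        (match pvRunO e (P.flatMap (pvG cfg current)) s1 with
         | some st => (true, st)
         | none => (false, s0)) := by
  intro P
  induction P with
  | nil => intro s1 s0; rw [pvPosA]; rfl
  | cons p rest ih =>
    obtain ⟨i, sym⟩ := p
    intro s1 s0
    rw [pvPosA, List.flatMap_cons, pvRunO_append]
    cases hlook : (PySem.Dict.mk cfg).get? sym with
    | none =>
      have hg : pvG cfg current (i, sym) = [] := by simp [pvG, hlook]
      rw [hg]
      simp only [pvRunO]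
      exact ih s1 s0
    | some prods =>
      show (match pvProdsA e current i prods s1 with
            | (true, st) => (true, st)
            | (false, st) => pvPosA cfg e current rest st s0) = _
      have hg : pvG cfg current (i, sym) =
          prods.map (fun pr => PySem.List.slice current none (some i) ++ pr ++ PySem.List.slice current (some (i+1)) none) := by
        simp [pvG, hlook]
      rw [hg, pvProdsA_eq e he current i prods s1]
      cases hro : pvRunO e (prods.map (fun pr => PySem.List.slice current none (some i) ++ pr ++ PySem.List.slice current (some (i+1)) none)) s1 with
      | some st => rfl
      | none => exact ih s1 s0

-- the machine's step bound is ≥ 2 on any node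
lemma pvCostB_ge_two (cfg : List (String × List (List String))) (f : Nat) (c : List String) :
    2 ≤ pvCostB cfg f c := by
  cases f <;> simp [pvCostB]

lemma pvPhiB_pop (cfg : List (String × List (List String))) (limit d : Nat)
    (rest : List (List (List String) × Nat)) :
    pvPhiB cfg limit rest < pvPhiB cfg limit (([], d) :: rest) := by
  simp [pvPhiB]

lemma pvPhiB_skip (cfg : List (String × List (List String))) (limit d : Nat)
    (c : List String) (cs : List (List String)) (rest : List (List (List String) × Nat)) :
    pvPhiB cfg limit ((cs, d) :: rest) < pvPhiB cfg limit ((c :: cs, d) :: rest) := by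
  have h2 := pvCostB_ge_two cfg (limit - d) c
  simp [pvPhiB]
  omega

lemma pvPhiB_push (cfg : List (String × List (List String))) (limit d : Nat)
    (hcut : d + 1 ≤ limit)
    (c : List String) (cs : List (List String)) (rest : List (List (List String) × Nat)) :
    pvPhiB cfg limit ((pvChildrenB cfg c, d + 1) :: (cs, d) :: rest) <
      pvPhiB cfg limit ((c :: cs, d) :: rest) := by
  have hd : limit - d = (limit - (d + 1)) + 1 := by omega
  simp [pvPhiB, hd, pvCostB]
  omega

-- any fuel strictly above the step bound gives the same run (the guard is never hit)
lemma pvLoopB_fuel_irrel (cfg : List (String × List (List String))) (target : String) (limit : Nat) :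
    ∀ (fuel1 : Nat) (stack : List (List (List String) × Nat)) (path : List String) (fuel2 : Nat),
      pvPhiB cfg limit stack < fuel1 → pvPhiB cfg limit stack < fuel2 →
      pvLoopB cfg target limit fuel1 stack path = pvLoopB cfg target limit fuel2 stack path := by
  intro fuel1
  induction fuel1 with
  | zero => intro stack path fuel2 h1 _; exact absurd h1 (Nat.not_lt_zero _)
  | succ f1 ih =>
    intro stack path fuel2 h1 h2
    cases fuel2 with
    | zero => exact absurd h2 (Nat.not_lt_zero _)
    | succ f2 =>
      cases stack with
      | nil => rw [pvLoopB, pvLoopB]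
      | cons fr rest =>
        obtain ⟨cs0, d⟩ := fr
        cases cs0 with
        | nil =>
          rw [pvLoopB, pvLoopB]
          have hp := pvPhiB_pop cfg limit d rest
          exact ih rest path.dropLast f2 (by omega) (by omega)
        | cons c cs =>
          rw [pvLoopB, pvLoopB]
          by_cases ht : PySem.Str.join "" c == target
          · rw [if_pos ht, if_pos ht]
          · rw [if_neg ht, if_neg ht]
            by_cases hcut : limit < d + 1
            · rw [if_pos hcut, if_pos hcut]
              have hs := pvPhiB_skip cfg limit d c cs rest
              exact ih _ path f2 (by omega) (by omega)
            · rw [if_neg hcut, if_neg hcut]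
              have hs := pvPhiB_push cfg limit d (by omega) c cs rest
              exact ih _ _ f2 (by omega) (by omega)

-- the stack machine processes the top frame exactly as A runs its children, then resumes
lemma pvLoopB_eq (cfg : List (String × List (List String))) (target : String) (limit : Nat) :
    ∀ (n d : Nat), n = limit - d → d ≤ limit →
      ∀ (cs : List (List String)) (rest : List (List (List String) × Nat))
        (path : List String) (fuel : Nat), pvPhiB cfg limit ((cs, d) :: rest) < fuel →
        pvLoopB cfg target limit fuel ((cs, d) :: rest) path =
          (match pvRunO (fun c' s' => pvExpandA cfg target n c' s') cs path with
           | some st => (true, st)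
           | none => pvLoopB cfg target limit (pvPhiB cfg limit rest + 1) rest path.dropLast) := by
  intro n
  induction n with
  | zero =>
    intro d hn hd cs rest path
    induction cs generalizing path with
    | nil =>
      intro fuel hf
      cases fuel with
      | zero => exact absurd hf (Nat.not_lt_zero _)
      | succ f =>
        have hp := pvPhiB_pop cfg limit d rest
        rw [pvLoopB, pvRunO]
        exact pvLoopB_fuel_irrel cfg target limit f rest path.dropLast
          (pvPhiB cfg limit rest + 1) (by omega) (by omega)
    | cons c cs ih =>
      intro fuel hf
      cases fuel with
      | zero => exact absurd hf (Nat.not_lt_zero _)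
      | succ f =>
        rw [pvLoopB]
        by_cases ht : PySem.Str.join "" c == target
        · rw [if_pos ht]
          simp only [pvRunO]
          rw [pvExpandA_zero, if_pos ht]
        · have hcut : limit < d + 1 := by omega
          rw [if_neg ht, if_pos hcut]
          simp only [pvRunO]
          rw [pvExpandA_zero, if_neg ht]
          have hs := pvPhiB_skip cfg limit d c cs rest
          exact ih path f (by omega)
  | succ m ihm =>
    intro d hn hd cs rest path
    induction cs generalizing path with
    | nil =>
      intro fuel hf
      cases fuel with
      | zero => exact absurd hf (Nat.not_lt_zero _)
      | succ f =>
        have hp := pvPhiB_pop cfg limit d rest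
        rw [pvLoopB, pvRunO]
        exact pvLoopB_fuel_irrel cfg target limit f rest path.dropLast
          (pvPhiB cfg limit rest + 1) (by omega) (by omega)
    | cons c cs ih =>
      intro fuel hf
      cases fuel with
      | zero => exact absurd hf (Nat.not_lt_zero _)
      | succ f =>
        rw [pvLoopB]
        by_cases ht : PySem.Str.join "" c == target
        · rw [if_pos ht]
          simp only [pvRunO]
          rw [pvExpandA_succ, if_pos ht]
        · have hcut : ¬ limit < d + 1 := by omega
          rw [if_neg ht, if_neg hcut]
          have hpush := pvPhiB_push cfg limit d (by omega) c cs rest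
          rw [ihm (d + 1) (by omega) (by omega) (pvChildrenB cfg c) ((cs, d) :: rest)
              (path ++ [PySem.Str.join " " c]) f (by omega)]
          simp only [pvRunO]
          rw [pvExpandA_succ, if_neg ht,
              pvPosA_eq cfg _ (fun c' s' h' => pvExpandA_false cfg target m c' s' h') c]
          have hch : (PySem.List.enumerate c 0).flatMap (pvG cfg c) = pvChildrenB cfg c := rfl
          rw [hch]
          have hdl : (path ++ [PySem.Str.join " " c]).dropLast = path := by simp
          rw [hdl]
          cases hro : pvRunO (fun c' s' => pvExpandA cfg target m c' s') (pvChildrenB cfg c)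
              (path ++ [PySem.Str.join " " c]) with
          | some st => rfl
          | none =>
            simp only
            have hs := pvPhiB_skip cfg limit d c cs rest
            exact ih path (pvPhiB cfg limit ((cs, d) :: rest) + 1) (by omega)

lemma pvJoin_singleton (sep x : String) : PySem.Str.join sep [x] = x := by
  simp [PySem.Str.join]

-- ===== VERDICT (by name: the statement is the Claim_ definition above) =====
theorem derive_string_spec : Claim_equal_derive_string := by
  intro cfg start_symbol target_string _hdom
  unfold Spec_derive_string derive_string derive_string_alt
  rw [pvExpandA_succ]
  simp only [List.nil_append, pvJoin_singleton]
  by_cases ht : start_symbol == target_string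
  · rw [if_pos ht, if_pos ht]
  · rw [if_neg ht, if_neg ht]
    rw [pvPosA_eq cfg _ (fun c' s' h' => pvExpandA_false cfg target_string (2 * target_string.toList.length) c' s' h') [start_symbol]]
    have hch : (PySem.List.enumerate [start_symbol] 0).flatMap (pvG cfg [start_symbol]) =
        pvChildrenB cfg [start_symbol] := rfl
    rw [hch]
    rw [pvLoopB_eq cfg target_string (2 * target_string.toList.length)
        (2 * target_string.toList.length) 0 (by omega) (by omega)
        (pvChildrenB cfg [start_symbol]) [] [start_symbol]
        (pvPhiB cfg (2 * target_string.toList.length) [(pvChildrenB cfg [start_symbol], 0)] + 1)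
        (by omega)]
    cases hro : pvRunO (fun c' s' => pvExpandA cfg target_string (2 * target_string.toList.length) c' s')
        (pvChildrenB cfg [start_symbol]) [start_symbol] with
    | some st => rfl
    | none => rfl
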